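-- pv_equiv track=rewrite | github.com/tamlog06/AntBook | 2-2/best-cow-line.py | solve
-- ===== SOURCE A (Python) =====
-- def solve(N, S):
--     ans = ''
--     start = 0
--     end = N
--     for _ in range(N):
--         if S[start:end] < S[start:end][::-1]:
--             ans += S[start]
--             start += 1
--         elif S[start:end] > S[start:end][::-1]:
--             ans += S[end - 1]
--             end -= 1
--         else:
--             ans += S[start]
--             start += 1
--
--     return ans
-- ===== SOURCE B (Python) =====
-- def solve(N, S):
--     # Two-pointer greedy: decide front vs back by scanning to the first
--     # asymmetric pair instead of building and reversing slices each step.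
--     i, j = 0, N - 1
--     out = []
--     while i <= j:
--         k = 0
--         while i + k < j - k and S[i + k] == S[j - k]:
--             k += 1
--         if S[i + k] <= S[j - k]:
--             out.append(S[i])
--             i += 1
--         else:
--             out.append(S[j])
--             j -= 1
--     return ''.join(out)
-- ===== Notes on version B (the rewrite author's own statement) =====
-- stated objective: alternative
-- what changed: A rebuilds and reverses the remaining substring to compare S[start:end] with its reverse at every step; B keeps two pointers into S and decides each step by scanning inward only to the first asymmetric character pair, with no slice or reversed copy ever built.
import Mathlib
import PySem

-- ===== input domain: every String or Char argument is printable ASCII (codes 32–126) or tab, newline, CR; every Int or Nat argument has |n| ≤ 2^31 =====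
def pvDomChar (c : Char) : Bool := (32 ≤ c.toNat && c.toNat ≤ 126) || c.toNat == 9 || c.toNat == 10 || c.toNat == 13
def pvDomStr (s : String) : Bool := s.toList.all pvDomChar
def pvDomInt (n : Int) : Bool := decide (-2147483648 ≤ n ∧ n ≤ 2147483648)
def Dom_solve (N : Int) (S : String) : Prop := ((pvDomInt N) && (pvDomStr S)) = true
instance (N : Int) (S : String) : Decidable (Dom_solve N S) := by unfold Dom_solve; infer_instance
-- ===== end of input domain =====

-- B replaces A's per-step slice-and-reverse comparison by a two-pointer scan to the first
-- asymmetric character pair (alternative mechanism, no slice/reverse allocations per step).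

-- ===== PORT A =====
-- one loop iteration of A: state (ans, start, end); the loop variable is unused
def stepA (cs : List Char) (st : List Char × Int × Int) (_ : Int) : List Char × Int × Int :=
  let t := PySem.List.slice cs (some st.2.1) (some st.2.2)          -- S[start:end]
  let r := (PySem.List.slice? t none none (-1)).getD []            -- S[start:end][::-1]
  if t < r then
    (st.1 ++ [(PySem.List.pyGet? cs st.2.1).getD ' '], st.2.1 + 1, st.2.2)
  else if r < t then
    (st.1 ++ [(PySem.List.pyGet? cs (st.2.2 - 1)).getD ' '], st.2.1, st.2.2 - 1)
  else
    (st.1 ++ [(PySem.List.pyGet? cs st.2.1).getD ' '], st.2.1 + 1, st.2.2)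

def solve (N : Int) (S : String) : String :=
  String.mk ((PySem.List.pyRange 0 N 1).foldl (stepA S.toList) ([], 0, N)).1

-- ===== PORT B =====
-- inner while loop of B: advance k to the first pair i+k, j-k with i+k ≥ j-k or S[i+k] ≠ S[j-k]
def scanB (cs : List Char) (i j k : Int) : Int :=
  if h : i + k < j - k ∧ (PySem.List.pyGet? cs (i + k)).getD ' ' = (PySem.List.pyGet? cs (j - k)).getD ' ' then
    scanB cs i j (k + 1)
  else k
termination_by (j - k - (i + k)).toNat
decreasing_by omega

-- outer while loop of B: out is the accumulated output list
def goB (cs : List Char) (i j : Int) (out : List Char) : List Char :=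
  if h : i ≤ j then
    let k := scanB cs i j 0
    if (PySem.List.pyGet? cs (i + k)).getD ' ' ≤ (PySem.List.pyGet? cs (j - k)).getD ' ' then
      goB cs (i + 1) j (out ++ [(PySem.List.pyGet? cs i).getD ' '])
    else
      goB cs i (j - 1) (out ++ [(PySem.List.pyGet? cs j).getD ' '])
  else out
termination_by (j - i + 1).toNat
decreasing_by all_goals omega

def solve_alt (N : Int) (S : String) : String :=
  String.mk (goB S.toList 0 (N - 1) [])

-- ===== PRECONDITION & SPEC =====
-- Pre_ excludes exactly the inputs with N > len(S), on which A (and B) raise IndexError.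
def Pre_solve (N : Int) (S : String) : Prop := N ≤ (S.toList.length : Int)
instance (N : Int) (S : String) : Decidable (Pre_solve N S) := by unfold Pre_solve; infer_instance
def pvWitness_solve : Int × String := (4, "acdb")

def Spec_solve (N : Int) (S : String) (out : String) : Prop := out = solve_alt N S
instance (N : Int) (S : String) (out : String) : Decidable (Spec_solve N S out) := by unfold Spec_solve; infer_instance

-- ===== CLAIM (what is proved, stated in full; the proofs are below) =====
def Claim_equal_solve : Prop := ∀ (N : Int) (S : String), Dom_solve N S → Pre_solve N S → Spec_solve N S (solve N S)

-- ===== LEMMAS AND PROOFS =====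

-- the window S[p..q] (both ends included), as a list, Nat indices
def wnd (cs : List Char) (p q : Nat) : List Char := (cs.drop p).take (q + 1 - p)

lemma gd_eq (cs : List Char) (p : Int) (h0 : 0 ≤ p) :
    (PySem.List.pyGet? cs p).getD ' ' = cs.getD p.toNat ' ' := by
  rw [PySem.List.pyGet?_of_nonneg cs h0, List.getD_eq_getElem?_getD]

lemma wnd_single (cs : List Char) (p : Nat) (hp : p < cs.length) :
    wnd cs p p = [cs.getD p ' '] := by
  unfold wnd
  rw [show p + 1 - p = 0 + 1 by omega, List.drop_eq_getElem_cons hp, List.take_succ_cons,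
      List.take_zero, List.getD_eq_getElem?_getD, List.getElem?_eq_getElem hp]
  rfl

lemma wnd_cons (cs : List Char) (p q : Nat) (hpq : p ≤ q) (hq : q < cs.length) :
    wnd cs p q = cs.getD p ' ' :: wnd cs (p+1) q := by
  unfold wnd
  rw [show q + 1 - p = (q - p) + 1 by omega, List.drop_eq_getElem_cons (show p < cs.length by omega),
      List.take_succ_cons, show q + 1 - (p+1) = q - p by omega,
      List.getD_eq_getElem?_getD, List.getElem?_eq_getElem (show p < cs.length by omega)]
  rfl

lemma wnd_snoc (cs : List Char) (p q : Nat) (hpq : p ≤ q + 1) (hq : q + 1 < cs.length) :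
    wnd cs p (q+1) = wnd cs p q ++ [cs.getD (q+1) ' '] := by
  unfold wnd
  rw [show q + 1 + 1 - p = (q + 1 - p) + 1 by omega, List.take_succ, List.getElem?_drop,
      show p + (q + 1 - p) = q + 1 by omega,
      List.getD_eq_getElem?_getD, List.getElem?_eq_getElem hq]
  rfl

-- lex on equal-length lists ignores a common last element
lemma append_singleton_lt_iff (c : Char) :
    ∀ (u v : List Char), u.length = v.length → (u ++ [c] < v ++ [c] ↔ u < v) := by
  intro u
  induction u with
  | nil =>
    intro v hv
    rw [List.length_nil] at hv
    rw [List.eq_nil_of_length_eq_zero hv.symm]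
    simp
  | cons x u' ih =>
    intro v hv
    match v with
    | y :: v' =>
      simp only [List.cons_append, List.cons_lt_cons_iff]
      rw [ih v' (by simpa using hv)]

-- shifting the scan start: one symmetric pair peeled off
lemma scanB_shift (cs : List Char) :
    ∀ (n : Nat) (i j k : Int), (j - i - 2*k).toNat ≤ n →
      scanB cs i j (k + 1) = scanB cs (i + 1) (j - 1) k + 1 := by
  intro n
  induction n with
  | zero =>
    intro i j k hn
    conv_lhs => rw [scanB]
    conv_rhs => rw [scanB]
    rw [dif_neg (by omega), dif_neg (by omega)]
  | succ m ih =>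
    intro i j k hn
    have e1 : i + (k + 1) = i + 1 + k := by ring
    have e2 : j - (k + 1) = j - 1 - k := by ring
    by_cases hc : i + 1 + k < j - 1 - k ∧
        (PySem.List.pyGet? cs (i + 1 + k)).getD ' ' = (PySem.List.pyGet? cs (j - 1 - k)).getD ' '
    · conv_lhs => rw [scanB]
      rw [e1, e2, dif_pos hc]
      conv_rhs => rw [scanB]
      rw [dif_pos hc]
      exact ih i j (k + 1) (by omega)
    · conv_lhs => rw [scanB]
      rw [e1, e2, dif_neg hc]
      conv_rhs => rw [scanB]
      rw [dif_neg hc]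

-- CORE: B's two-pointer decision agrees with A's slice-vs-reversed-slice decision
lemma core (cs : List Char) :
    ∀ (n : Nat) (i j : Int), (j - i).toNat ≤ n → 0 ≤ i → i ≤ j → j < (cs.length : Int) →
      (((PySem.List.pyGet? cs (i + scanB cs i j 0)).getD ' ' ≤
        (PySem.List.pyGet? cs (j - scanB cs i j 0)).getD ' ') ↔
       ¬ ((wnd cs i.toNat j.toNat).reverse < wnd cs i.toNat j.toNat)) := by
  intro n
  induction n with
  | zero =>
    intro i j hn h0 hij hj
    have hij' : i = j := by omega
    subst hij'
    have hK : scanB cs i i 0 = 0 := by rw [scanB]; rw [dif_neg (by omega)]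
    rw [hK, add_zero, sub_zero, wnd_single cs i.toNat (by omega)]
    simp
  | succ m ih =>
    intro i j hn h0 hij hj
    rcases eq_or_lt_of_le hij with hij' | hlt
    · subst hij'
      have hK : scanB cs i i 0 = 0 := by rw [scanB]; rw [dif_neg (by omega)]
      rw [hK, add_zero, sub_zero, wnd_single cs i.toNat (by omega)]
      simp
    · set p := i.toNat with hp
      set q := j.toNat with hq
      have hpq : p < q := by omega
      have hqlen : q < cs.length := by omega
      have ha : (PySem.List.pyGet? cs i).getD ' ' = cs.getD p ' ' := gd_eq cs i h0
      have hb : (PySem.List.pyGet? cs j).getD ' ' = cs.getD q ' ' := gd_eq cs j (by omega)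
      -- window decomposition  w = a :: mid ++ [b]
      have hw : wnd cs p q = cs.getD p ' ' :: (wnd cs (p+1) (q-1) ++ [cs.getD q ' ']) := by
        rw [wnd_cons cs p q (by omega) hqlen]
        congr 1
        have := wnd_snoc cs (p+1) (q-1) (by omega) (by omega : q - 1 + 1 < cs.length)
        rw [show q - 1 + 1 = q by omega] at this
        exact this
      by_cases heq : cs.getD p ' ' = cs.getD q ' '
      · -- equal ends
        have hK1 : scanB cs i j 0 = scanB cs i j 1 := by
          rw [scanB]
          rw [dif_pos ⟨by omega, by rw [add_zero, sub_zero, ha, hb]; exact heq⟩]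
          norm_num
        by_cases hmid : i + 1 ≤ j - 1
        · -- recurse on the middle window
          have hK2 : scanB cs i j 1 = scanB cs (i+1) (j-1) 0 + 1 := by
            have := scanB_shift cs (j - i).toNat i j 0 (by omega)
            simpa using this
          have hih := ih (i+1) (j-1) (by omega) (by omega) hmid (by omega)
          have hmp : (i+1).toNat = p + 1 := by omega
          have hmq : (j-1).toNat = q - 1 := by omega
          rw [hmp, hmq] at hih
          rw [hK1, hK2]
          rw [show i + (scanB cs (i+1) (j-1) 0 + 1) = (i+1) + scanB cs (i+1) (j-1) 0 by ring,
              show j - (scanB cs (i+1) (j-1) 0 + 1) = (j-1) - scanB cs (i+1) (j-1) 0 by ring]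
          rw [hih, hw]
          set md := wnd cs (p+1) (q-1) with hmd
          rw [show (cs.getD p ' ' :: (md ++ [cs.getD q ' '])).reverse
              = cs.getD q ' ' :: (md.reverse ++ [cs.getD p ' ']) by simp]
          rw [heq]
          rw [List.cons_lt_cons_iff]
          simp only [lt_irrefl, false_or, true_and]
          rw [← heq] at hw ⊢
          rw [append_singleton_lt_iff _ _ _ (by simp)]
        · -- window of size exactly 2
          have hK2 : scanB cs i j 1 = 1 := by
            rw [scanB]; rw [dif_neg (by omega)]
          rw [hK1, hK2, hw]
          have hmid0 : wnd cs (p+1) (q-1) = [] := by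
            unfold wnd; rw [show q - 1 + 1 - (p+1) = 0 by omega]; simp
          rw [hmid0]
          have hi1 : (PySem.List.pyGet? cs (i+1)).getD ' ' = cs.getD q ' ' := by
            rw [gd_eq cs (i+1) (by omega)]; congr 1; omega
          have hj1 : (PySem.List.pyGet? cs (j-1)).getD ' ' = cs.getD p ' ' := by
            rw [gd_eq cs (j-1) (by omega)]; congr 1; omega
          rw [hi1, hj1, heq]
          simp
      · -- unequal ends: the scan stops at once, the lex order is decided at the ends
        have hK : scanB cs i j 0 = 0 := by
          rw [scanB]
          rw [dif_neg ?_]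
          rintro ⟨-, h2⟩
          rw [add_zero, sub_zero, ha, hb] at h2
          exact heq h2
        rw [hK, add_zero, sub_zero, ha, hb, hw]
        set md := wnd cs (p+1) (q-1) with hmd
        rw [show (cs.getD p ' ' :: (md ++ [cs.getD q ' '])).reverse
            = cs.getD q ' ' :: (md.reverse ++ [cs.getD p ' ']) by simp]
        rw [List.cons_lt_cons_iff]
        constructor
        · intro hle h
          rcases h with h | ⟨h, -⟩
          · exact absurd h (not_lt.mpr hle)
          · exact heq h.symm
        · intro hnot
          by_contra hlt'
          exact hnot (Or.inl (lt_of_not_ge hlt'))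

-- OUTER: A's fold over range(N) equals B's shrinking-window recursion
lemma loop (cs : List Char) :
    ∀ (n : Nat) (L : List Int) (ans : List Char) (s e : Int),
      L.length = n → 0 ≤ s → e ≤ (cs.length : Int) → e - s = (n : Int) →
      (L.foldl (stepA cs) (ans, s, e)).1 = goB cs s (e - 1) ans := by
  intro n
  induction n with
  | zero =>
    intro L ans s e hL h0 he hes
    rw [List.eq_nil_of_length_eq_zero hL, List.foldl_nil, goB, dif_neg (by omega)]
  | succ m ih =>
    intro L ans s e hL h0 he hes
    match L with
    | x :: L' =>
      have hse : s < e := by omega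
      have hwnd : PySem.List.slice cs (some s) (some e) = wnd cs s.toNat (e.toNat - 1) := by
        rw [PySem.List.slice_toNat cs h0 (by omega)]
        unfold wnd
        congr 1
        omega
      have hstep : stepA cs (ans, s, e) x =
          if ¬ ((wnd cs s.toNat (e.toNat - 1)).reverse < wnd cs s.toNat (e.toNat - 1)) then
            (ans ++ [(PySem.List.pyGet? cs s).getD ' '], s + 1, e)
          else
            (ans ++ [(PySem.List.pyGet? cs (e - 1)).getD ' '], s, e - 1) := by
        unfold stepA
        dsimp only
        rw [hwnd, PySem.List.slice?_none_none_neg_one, Option.getD_some]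
        set w := wnd cs s.toNat (e.toNat - 1) with hwdef
        by_cases h1 : w < w.reverse
        · rw [if_pos h1, if_pos (not_lt_of_gt h1)]
        · rw [if_neg h1]
          by_cases h2 : w.reverse < w
          · rw [if_pos h2, if_neg (not_not_intro h2)]
          · rw [if_neg h2, if_pos h2]
      have hcore := core cs (e - 1 - s).toNat s (e - 1) le_rfl h0 (by omega) (by omega)
      have het : (e - 1).toNat = e.toNat - 1 := by omega
      rw [het] at hcore
      rw [List.foldl_cons, hstep]
      conv_rhs => rw [goB]
      rw [dif_pos (show s ≤ e - 1 by omega)]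
      by_cases hc : (wnd cs s.toNat (e.toNat - 1)).reverse < wnd cs s.toNat (e.toNat - 1)
      · rw [if_neg (not_not_intro hc)]
        rw [ih L' (ans ++ [(PySem.List.pyGet? cs (e - 1)).getD ' ']) s (e - 1)
            (by simpa using hL) h0 (by omega) (by omega)]
        rw [if_neg (by rw [hcore]; exact not_not_intro hc)]
      · rw [if_pos hc]
        rw [ih L' (ans ++ [(PySem.List.pyGet? cs s).getD ' ']) (s + 1) e
            (by simpa using hL) (by omega) he (by omega)]
        rw [if_pos (hcore.mpr hc)]

-- ===== VERDICT (by name: the statement is the Claim_ definition above) =====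
theorem solve_spec : Claim_equal_solve := by
  intro N S _ hpre
  unfold Spec_solve solve solve_alt
  by_cases hN : N ≤ 0
  · rw [PySem.List.pyRange_one_eq_nil (by omega)]
    simp only [List.foldl_nil]
    rw [goB]
    simp only [dif_neg (by omega : ¬ ((0:Int) ≤ N - 1))]
  · rw [loop S.toList N.toNat (PySem.List.pyRange 0 N 1) [] 0 N
        (by rw [PySem.List.length_pyRange_one]; omega) le_rfl hpre (by omega)]
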